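-- pv_equiv track=rewrite | github.com/iwen-conf/Skills | Arc/arc:exec/scripts/render_dispatch_report.py | parse_dispatch_row
-- ===== SOURCE A (Python) =====
-- def parse_dispatch_row(raw: str) -> dict[str, str]:
--     parts = [part.strip() for part in raw.split("|")]
--     while len(parts) < 5:
--         parts.append("")
--     profile, capabilities, description, status, output = parts[:5]
--     return {
--         "profile": profile or "pending",
--         "capabilities": capabilities or "[]",
--         "description": description or "pending",
--         "status": status or "pending",
--         "output": output or "pending",
--     }
-- ===== SOURCE B (Python) =====
-- WS = " \t\n\x0b\x0c\r"
-- KEYS = ("profile", "capabilities", "description", "status", "output")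
-- DEFAULTS = ("pending", "[]", "pending", "pending", "pending")
--
--
-- def parse_dispatch_row(raw: str) -> dict[str, str]:
--     # Single-pass character scanner: fields are cut at '|' and trimmed on the
--     # fly (leading whitespace skipped, trailing whitespace held in `pend` and
--     # dropped unless more content follows); scanning stops once five fields
--     # are complete, so extra fields are discarded without building them.
--     vals = []
--     cur = ""
--     pend = ""
--     for ch in raw:
--         if ch == "|":
--             vals.append(cur)
--             cur = pend = ""
--             if len(vals) == 5:
--                 break
--         elif ch in WS:
--             if cur:
--                 pend += ch
--         else:
--             cur += pend + ch
--             pend = ""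
--     else:
--         vals.append(cur)
--     while len(vals) < 5:
--         vals.append("")
--     return {k: v if v else d for k, v, d in zip(KEYS, vals, DEFAULTS)}
-- ===== Notes on version B (the rewrite author's own statement) =====
-- stated objective: alternative
-- what changed: Replaces split/strip/pad/destructure with a single-pass character scanner that cuts fields at each pipe separator and trims whitespace on the fly via a pending-whitespace buffer, stopping as soon as five fields are complete, then zips the values with a (key, default) table.
import Mathlib
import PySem

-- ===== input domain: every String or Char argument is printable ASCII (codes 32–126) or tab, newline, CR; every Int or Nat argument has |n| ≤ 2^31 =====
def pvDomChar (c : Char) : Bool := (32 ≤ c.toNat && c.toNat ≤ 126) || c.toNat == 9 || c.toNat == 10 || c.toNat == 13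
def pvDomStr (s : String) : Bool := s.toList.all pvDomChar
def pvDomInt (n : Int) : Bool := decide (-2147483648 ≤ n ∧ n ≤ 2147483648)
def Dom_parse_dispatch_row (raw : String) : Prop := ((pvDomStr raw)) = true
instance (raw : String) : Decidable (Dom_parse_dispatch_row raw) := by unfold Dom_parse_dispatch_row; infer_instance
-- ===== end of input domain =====

-- B replaces A's split/strip/pad/destructure pipeline by a single-pass character scanner
-- (fields cut at the pipe separator, trimmed on the fly, stops after five fields) zipped with a
-- (key, default) table; an alternative of the same cost.

-- ===== PORT A =====
-- while len(parts) < 5: parts.append("")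
def pvPadLoopA (parts : List String) : List String :=
  if parts.length < 5 then pvPadLoopA (parts ++ [""]) else parts
termination_by 5 - parts.length
decreasing_by simp_all; omega

def parse_dispatch_row (raw : String) : List (String × String) :=
  let parts := ((PySem.Str.split? raw "|").getD []).map PySem.Str.strip
  let parts := pvPadLoopA parts
  let profile := parts.getD 0 ""
  let capabilities := parts.getD 1 ""
  let description := parts.getD 2 ""
  let status := parts.getD 3 ""
  let output := parts.getD 4 ""
  [("profile", if profile = "" then "pending" else profile),
   ("capabilities", if capabilities = "" then "[]" else capabilities),
   ("description", if description = "" then "pending" else description),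
   ("status", if status = "" then "pending" else status),
   ("output", if output = "" then "pending" else output)]

-- ===== PORT B =====
-- WS = " \t\n\x0b\x0c\r"
def pvWS (c : Char) : Bool :=
  c == ' ' || c == '\t' || c == '\n' || c.toNat == 11 || c.toNat == 12 || c == '\r'

def pvKeys : List String := ["profile", "capabilities", "description", "status", "output"]
def pvDefaults : List String := ["pending", "[]", "pending", "pending", "pending"]

-- the for-loop of Source B: state (vals, cur, pend); character buffers kept as List Char
-- (Python str concatenation on these code points is exactly list append); the []
-- case is the for-else append, the length-5 test is the break.
def pvScan : List Char → List (List Char) → List Char → List Char → List (List Char)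
  | [], vals, cur, _pend => vals ++ [cur]
  | c :: rest, vals, cur, pend =>
    if c = '|' then
      if vals.length + 1 == 5 then vals ++ [cur]
      else pvScan rest (vals ++ [cur]) [] []
    else if pvWS c then
      if cur.isEmpty then pvScan rest vals cur pend
      else pvScan rest vals cur (pend ++ [c])
    else pvScan rest vals (cur ++ pend ++ [c]) []

-- while len(vals) < 5: vals.append("")
def pvPadLoopB (vals : List (List Char)) : List (List Char) :=
  if vals.length < 5 then pvPadLoopB (vals ++ [[]]) else vals
termination_by 5 - vals.length
decreasing_by simp_all; omega

def parse_dispatch_row_alt (raw : String) : List (String × String) :=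
  let vals := pvPadLoopB (pvScan raw.toList [] [] [])
  (pvKeys.zip (vals.zip pvDefaults)).map
    (fun p => (p.1, if p.2.1.isEmpty then p.2.2 else String.ofList p.2.1))

-- ===== PRECONDITION & SPEC =====
def Spec_parse_dispatch_row (raw : String) (out : List (String × String)) : Prop := out = parse_dispatch_row_alt raw
instance (raw : String) (out : List (String × String)) : Decidable (Spec_parse_dispatch_row raw out) := by unfold Spec_parse_dispatch_row; infer_instance

-- ===== CLAIM =====
def Claim_equal_parse_dispatch_row : Prop := ∀ (raw : String), Dom_parse_dispatch_row raw → Spec_parse_dispatch_row raw (parse_dispatch_row raw)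

-- ===== LEMMAS AND PROOFS =====

-- reference split of a char list on '|' (Python split semantics: "" ↦ [""])
def pvSplitC : List Char → List (List Char)
  | [] => [[]]
  | c :: rest =>
    if c = '|' then [] :: pvSplitC rest
    else
      match pvSplitC rest with
      | s :: ss => (c :: s) :: ss
      | [] => [[c]]

theorem pvSplitC_cons (c : Char) (rest : List Char) :
    pvSplitC (c :: rest)
      = if c = '|' then [] :: pvSplitC rest
        else
          match pvSplitC rest with
          | s :: ss => (c :: s) :: ss
          | [] => [[c]] := rfl

theorem pvSplitC_ne_nil (l : List Char) : pvSplitC l ≠ [] := by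
  cases l with
  | nil => simp [pvSplitC]
  | cons c rest =>
      simp only [pvSplitC]
      split_ifs
      · simp
      · cases h : pvSplitC rest <;> simp

theorem pvSplitC_all (p : Char → Bool) (l : List Char) (h : l.all p) :
    ∀ seg ∈ pvSplitC l, seg.all p := by
  induction l with
  | nil => intro seg hs; simp [pvSplitC] at hs; simp [hs]
  | cons c rest ih =>
      simp only [List.all_cons, Bool.and_eq_true] at h
      intro seg hs
      rw [pvSplitC_cons] at hs
      by_cases hc : c = '|'
      · rw [if_pos hc] at hs
        rcases List.mem_cons.mp hs with hs | hs
        · simp [hs]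
        · exact ih h.2 seg hs
      · rw [if_neg hc] at hs
        cases hr : pvSplitC rest with
        | nil => exact absurd hr (pvSplitC_ne_nil rest)
        | cons s ss =>
            rw [hr] at hs
            rcases List.mem_cons.mp hs with hs | hs
            · subst hs
              have := ih h.2 s (by rw [hr]; exact List.mem_cons_self ..)
              simp [h.1, this]
            · exact ih h.2 seg (by rw [hr]; exact List.mem_cons_of_mem _ hs)

theorem splitOn_go_eq (fuel : Nat) : ∀ (l cur : List Char) (acc : List (List Char)),
    l.length ≤ fuel →
    PySem.Chars.splitOn.go ['|'] fuel l cur acc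
      = acc.reverse ++ (pvSplitC l).modifyHead (cur.reverse ++ ·) := by
  induction fuel with
  | zero =>
      intro l cur acc h
      have : l = [] := List.length_eq_zero_iff.mp (Nat.le_zero.mp h)
      subst this
      simp [PySem.Chars.splitOn.go, pvSplitC]
  | succ fuel ih =>
      intro l cur acc h
      cases l with
      | nil => simp [PySem.Chars.splitOn.go, pvSplitC]
      | cons c rest =>
          by_cases hc : c = '|'
          · subst hc
            have hp : List.isPrefixOf ['|'] ('|' :: rest) = true := by
              simp [List.isPrefixOf]
            simp only [PySem.Chars.splitOn.go, hp, if_true, List.drop_succ_cons,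
              List.drop_zero, List.length_singleton]
            have := ih rest [] ((cur.reverse) :: acc) (by simpa using h)
            rw [this, pvSplitC_cons, if_pos rfl]
            simp only [List.modifyHead, List.reverse_cons, List.reverse_nil,
              List.nil_append, List.append_assoc, List.singleton_append]
            cases pvSplitC rest <;> simp
          · have hp : List.isPrefixOf ['|'] (c :: rest) = false := by
              simp [List.isPrefixOf]
              exact fun h' => absurd h'.symm hc
            simp only [PySem.Chars.splitOn.go, hp, if_false, Bool.false_eq_true]
            have := ih rest (c :: cur) acc (by simpa using Nat.le_of_succ_le_succ h)
            rw [this]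
            cases hr : pvSplitC rest with
            | nil => exact absurd hr (pvSplitC_ne_nil rest)
            | cons s ss => simp [pvSplitC, hc, hr, List.modifyHead]

theorem splitOn_eq_pvSplitC (l : List Char) :
    PySem.Chars.splitOn l ['|'] = pvSplitC l := by
  rw [PySem.Chars.splitOn, splitOn_go_eq (l.length + 1) l [] [] (by omega)]
  cases pvSplitC l <;> simp [List.modifyHead]

-- trimming helpers characterizing the scanner's state
def pvRstrip (l : List Char) : List Char := (l.reverse.dropWhile pvWS).reverse
def pvStrip (l : List Char) : List Char := pvRstrip (l.dropWhile pvWS)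

theorem pvRstrip_all_ws (l : List Char) (h : l.all pvWS) : pvRstrip l = [] := by
  unfold pvRstrip
  have : l.reverse.dropWhile pvWS = [] := by
    rw [List.dropWhile_eq_nil_iff]
    intro x hx
    exact (List.all_eq_true.mp h) x (List.mem_reverse.mp hx)
  simp [this]

theorem pvRstrip_append_cons (xs ys : List Char) (c : Char) (hc : pvWS c = false) :
    pvRstrip (xs ++ c :: ys) = xs ++ c :: pvRstrip ys := by
  unfold pvRstrip
  rw [show xs ++ c :: ys = (xs ++ [c]) ++ ys by simp, List.reverse_append,
    List.dropWhile_append]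
  by_cases hy : ys.reverse.dropWhile pvWS = []
  · simp [hy, List.reverse_append, hc]
  · simp [hy, List.reverse_append]

theorem pvChar_toNat_inj (a b : Char) (h : a.toNat = b.toNat) : a = b :=
  Char.ext (UInt32.toNat_inj.mp h)

theorem pvWS_eq_isspace (c : Char) (h : pvDomChar c = true) :
    pvWS c = PySem.Chars.isspace c := by
  have h32 : (c = ' ') ↔ c.toNat = 32 := ⟨fun h => by subst h; rfl, fun h => pvChar_toNat_inj _ _ h⟩
  have h9 : (c = '\t') ↔ c.toNat = 9 := ⟨fun h => by subst h; rfl, fun h => pvChar_toNat_inj _ _ h⟩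
  have h10 : (c = '\n') ↔ c.toNat = 10 := ⟨fun h => by subst h; rfl, fun h => pvChar_toNat_inj _ _ h⟩
  have h13 : (c = '\r') ↔ c.toNat = 13 := ⟨fun h => by subst h; rfl, fun h => pvChar_toNat_inj _ _ h⟩
  simp only [pvDomChar, Bool.or_eq_true, Bool.and_eq_true, beq_iff_eq, decide_eq_true_eq] at h
  rw [Bool.eq_iff_iff]
  simp only [pvWS, PySem.Chars.isspace, Bool.or_eq_true, Bool.and_eq_true, beq_iff_eq,
    decide_eq_true_eq, h32, h9, h10, h13]
  omega

theorem pvDropWhile_congr (p q : Char → Bool) (l : List Char)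
    (h : ∀ x ∈ l, p x = q x) : l.dropWhile p = l.dropWhile q := by
  induction l with
  | nil => rfl
  | cons c rest ih =>
      have hc := h c (List.mem_cons_self ..)
      simp only [List.dropWhile_cons, hc]
      split
      · exact ih fun x hx => h x (List.mem_cons_of_mem _ hx)
      · rfl

theorem pvStrip_eq_strip (l : List Char) (h : l.all pvDomChar) :
    pvStrip l = PySem.Chars.strip l := by
  have hall := List.all_eq_true.mp h
  unfold pvStrip pvRstrip PySem.Chars.strip PySem.Chars.lstrip PySem.Chars.rstrip
  rw [pvDropWhile_congr pvWS PySem.Chars.isspace l (fun x hx => pvWS_eq_isspace x (hall x hx))]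
  congr 1
  apply pvDropWhile_congr
  intro x hx
  exact pvWS_eq_isspace x (hall x ((List.dropWhile_sublist _).subset (List.mem_reverse.mp hx)))

-- the stripped value of the first remaining segment, given scanner state (cur, pend)
def pvMix (cur pend seg : List Char) : List Char :=
  if cur = [] then pvStrip seg else cur ++ pvRstrip (pend ++ seg)

theorem pvMix_nil (cur pend : List Char) (hpend : pend.all pvWS = true) :
    pvMix cur pend [] = cur := by
  unfold pvMix
  split_ifs with hc
  · subst hc; simp [pvStrip, pvRstrip]
  · simp [pvRstrip_all_ws pend hpend]

theorem pvScan_eq : ∀ (cs : List Char) (vals : List (List Char)) (cur pend seg : List Char)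
    (segs : List (List Char)),
    cs.all pvDomChar = true → pend.all pvWS = true → (cur = [] → pend = []) →
    vals.length ≤ 4 → pvSplitC cs = seg :: segs →
    pvScan cs vals cur pend
      = List.take 5 (vals ++ pvMix cur pend seg :: segs.map pvStrip) := by
  intro cs
  induction cs with
  | nil =>
      intro vals cur pend seg segs _ hpend _ hv hsp
      simp only [pvSplitC] at hsp
      obtain ⟨h1, h2⟩ := List.cons_eq_cons.mp hsp
      subst h1; subst h2
      rw [pvScan, pvMix_nil cur pend hpend]
      rw [List.take_of_length_le (by simp; omega)]
      simp
  | cons c rest ih =>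
      intro vals cur pend seg segs hdom hpend hcp hv hsp
      simp only [List.all_cons, Bool.and_eq_true] at hdom
      obtain ⟨s, ss, hr⟩ : ∃ s ss, pvSplitC rest = s :: ss := by
        cases h : pvSplitC rest with
        | nil => exact absurd h (pvSplitC_ne_nil rest)
        | cons a b => exact ⟨a, b, rfl⟩
      by_cases hc : c = '|'
      · subst hc
        rw [pvSplitC_cons, if_pos rfl] at hsp
        obtain ⟨h1, h2⟩ := List.cons_eq_cons.mp hsp
        subst h1; subst h2
        rw [pvScan, if_pos rfl]
        by_cases h4 : vals.length + 1 = 5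
        · have hv4 : vals.length = 4 := by omega
          rw [if_pos (by simpa using h4), pvMix_nil cur pend hpend]
          rw [List.take_append, List.take_of_length_le (by omega), hv4]
          simp
        · rw [if_neg (by simpa using h4)]
          rw [ih (vals ++ [cur]) [] [] s ss hdom.2 rfl (fun _ => rfl)
            (by simp; omega) hr]
          rw [pvMix_nil cur pend hpend]
          have hms : pvMix [] [] s = pvStrip s := by simp [pvMix]
          rw [hms, hr]
          simp
      · -- c is not '|'
        rw [pvSplitC_cons, if_neg hc, hr] at hsp
        obtain ⟨h1, h2⟩ := List.cons_eq_cons.mp hsp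
        subst h1; subst h2
        rw [pvScan]
        rw [if_neg hc]
        by_cases hw : pvWS c = true
        · rw [if_pos hw]
          by_cases hcur : cur.isEmpty
          · have hcur' : cur = [] := by simpa using hcur
            rw [if_pos hcur]
            have hpend' : pend = [] := hcp hcur'
            subst hcur'; subst hpend'
            rw [ih vals [] [] s ss hdom.2 rfl (fun _ => rfl) hv hr]
            have : pvMix [] [] (c :: s) = pvMix [] [] s := by
              simp [pvMix, pvStrip, hw]
            rw [this]
          · rw [if_neg hcur]
            have hcur' : cur ≠ [] := by simpa using hcur
            rw [ih vals cur (pend ++ [c]) s ss hdom.2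
              (by simp [List.all_append, hpend, hw])
              (fun h => absurd h hcur') hv hr]
            have : pvMix cur (pend ++ [c]) s = pvMix cur pend (c :: s) := by
              simp [pvMix, hcur']
            rw [this]
        · rw [if_neg hw]
          have hne : cur ++ pend ++ [c] ≠ [] := by simp
          rw [ih vals (cur ++ pend ++ [c]) [] s ss hdom.2 rfl
            (fun h => absurd h hne) hv hr]
          have : pvMix (cur ++ pend ++ [c]) [] s = pvMix cur pend (c :: s) := by
            unfold pvMix
            rw [if_neg hne]
            split_ifs with hcur
            · subst hcur
              have hpend' : pend = [] := hcp rfl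
              subst hpend'
              rw [pvStrip, List.dropWhile_cons]
              simp only [hw, Bool.false_eq_true, if_false]
              rw [show (c :: s : List Char) = [] ++ c :: s from rfl,
                pvRstrip_append_cons [] s c (by simpa using hw)]
              rw [show pvRstrip ([] ++ s) = pvRstrip s from rfl]
              simp
            · rw [show (pend ++ c :: s : List Char) = pend ++ c :: s from rfl,
                pvRstrip_append_cons pend s c (by simpa using hw)]
              simp
          rw [this]

theorem pvPadLoopA_of_ge (xs : List String) (h : ¬ xs.length < 5) : pvPadLoopA xs = xs := by
  unfold pvPadLoopA; simp [h]

theorem pvPadLoopB_of_ge (xs : List (List Char)) (h : ¬ xs.length < 5) : pvPadLoopB xs = xs := by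
  unfold pvPadLoopB; simp [h]

-- final assembly: both results as a function of Q = (pvSplitC raw.toList).map pvStrip
theorem pvFinal_eq (Q : List (List Char)) (hQ : Q ≠ []) :
    (let parts := pvPadLoopA (Q.map String.ofList)
     [("profile", if parts.getD 0 "" = "" then "pending" else parts.getD 0 ""),
      ("capabilities", if parts.getD 1 "" = "" then "[]" else parts.getD 1 ""),
      ("description", if parts.getD 2 "" = "" then "pending" else parts.getD 2 ""),
      ("status", if parts.getD 3 "" = "" then "pending" else parts.getD 3 ""),
      ("output", if parts.getD 4 "" = "" then "pending" else parts.getD 4 "")])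
    = (let vals := pvPadLoopB (List.take 5 Q)
       (pvKeys.zip (vals.zip pvDefaults)).map
         (fun p => (p.1, if p.2.1.isEmpty then p.2.2 else String.ofList p.2.1))) := by
  match Q with
  | [] => exact absurd rfl hQ
  | [a] => simp [pvPadLoopA, pvPadLoopB, pvKeys, pvDefaults]
  | [a, b] => simp [pvPadLoopA, pvPadLoopB, pvKeys, pvDefaults]
  | [a, b, c] => simp [pvPadLoopA, pvPadLoopB, pvKeys, pvDefaults]
  | [a, b, c, d] => simp [pvPadLoopA, pvPadLoopB, pvKeys, pvDefaults]
  | a :: b :: c :: d :: e :: t =>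
      rw [pvPadLoopA_of_ge _ (by simp), show List.take 5 (a :: b :: c :: d :: e :: t)
          = [a, b, c, d, e] by simp, pvPadLoopB_of_ge _ (by simp)]
      simp [pvKeys, pvDefaults]

-- ===== VERDICT =====
theorem parse_dispatch_row_spec : Claim_equal_parse_dispatch_row := by
  intro raw hdom
  have hdom' : raw.toList.all pvDomChar = true := hdom
  unfold Spec_parse_dispatch_row parse_dispatch_row parse_dispatch_row_alt
  obtain ⟨seg, segs, hsp⟩ : ∃ s ss, pvSplitC raw.toList = s :: ss := by
    cases h : pvSplitC raw.toList with
    | nil => exact absurd h (pvSplitC_ne_nil raw.toList)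
    | cons a b => exact ⟨a, b, rfl⟩
  -- A's parts = Q.map String.ofList for Q = (pvSplitC raw.toList).map pvStrip
  have hsplit : (PySem.Str.split? raw "|").getD []
      = (pvSplitC raw.toList).map String.ofList := by
    simp [PySem.Str.split?, PySem.Chars.split?, splitOn_eq_pvSplitC]
  have hparts : ((PySem.Str.split? raw "|").getD []).map PySem.Str.strip
      = ((pvSplitC raw.toList).map pvStrip).map String.ofList := by
    rw [hsplit, List.map_map, List.map_map]
    apply List.map_congr_left
    intro seg' hseg'
    have hd : seg'.all pvDomChar := pvSplitC_all pvDomChar raw.toList hdom' seg' hseg'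
    simp [Function.comp, PySem.Str.strip, pvStrip_eq_strip seg' hd]
  -- B's scanned values = take 5 Q
  have hscan : pvScan raw.toList [] [] []
      = List.take 5 (((pvSplitC raw.toList)).map pvStrip) := by
    rw [pvScan_eq raw.toList [] [] [] seg segs hdom' rfl (fun _ => rfl) (by simp) hsp]
    have : pvMix [] [] seg = pvStrip seg := by simp [pvMix]
    rw [this, hsp]
    simp
  rw [hparts, hscan]
  exact pvFinal_eq ((pvSplitC raw.toList).map pvStrip)
    (by simp [pvSplitC_ne_nil raw.toList])
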